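-- pv_equiv track=rewrite | github.com/parshwa1956/rcmhealth | user_management.py | apply_phi_column_filter
-- ===== SOURCE A (Python) =====
-- from typing import Any, Dict, List, Optional
--
-- def apply_phi_column_filter(df_columns: List[str], phi_permissions: Dict[str, bool]) -> List[str]:
--     blocked_columns = set()
--     if not phi_permissions.get("can_view_phi", False):
--         blocked_columns.update({"patient_name", "visit_id", "mrn", "dob"})
--     else:
--         if not phi_permissions.get("can_view_patient_name", False):
--             blocked_columns.add("patient_name")
--         if not phi_permissions.get("can_view_visit_id", False):
--             blocked_columns.add("visit_id")
--         if not phi_permissions.get("can_view_mrn", False):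
--             blocked_columns.add("mrn")
--         if not phi_permissions.get("can_view_dob", False):
--             blocked_columns.add("dob")
--     return [col for col in df_columns if col not in blocked_columns]
-- ===== SOURCE B (Python) =====
-- PHI_TABLE = (
--     ("patient_name", "can_view_patient_name"),
--     ("visit_id", "can_view_visit_id"),
--     ("mrn", "can_view_mrn"),
--     ("dob", "can_view_dob"),
-- )
--
-- def apply_phi_column_filter(df_columns, phi_permissions):
--     # Staged deletion: one pass per PHI column that is not viewable,
--     # removing every occurrence of that column name from the working list.
--     out = list(df_columns)
--     master = phi_permissions.get("can_view_phi", False)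
--     for column, flag in PHI_TABLE:
--         if not (master and phi_permissions.get(flag, False)):
--             out = [c for c in out if c != column]
--     return out
-- ===== Notes on version B (the rewrite author's own statement) =====
-- stated objective: alternative
-- what changed: Instead of building a blocked set via a branch ladder and filtering once against it, B iterates over a fixed (column, flag) table and performs a staged deletion pass over the working list for each non-viewable PHI column.
import Mathlib
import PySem

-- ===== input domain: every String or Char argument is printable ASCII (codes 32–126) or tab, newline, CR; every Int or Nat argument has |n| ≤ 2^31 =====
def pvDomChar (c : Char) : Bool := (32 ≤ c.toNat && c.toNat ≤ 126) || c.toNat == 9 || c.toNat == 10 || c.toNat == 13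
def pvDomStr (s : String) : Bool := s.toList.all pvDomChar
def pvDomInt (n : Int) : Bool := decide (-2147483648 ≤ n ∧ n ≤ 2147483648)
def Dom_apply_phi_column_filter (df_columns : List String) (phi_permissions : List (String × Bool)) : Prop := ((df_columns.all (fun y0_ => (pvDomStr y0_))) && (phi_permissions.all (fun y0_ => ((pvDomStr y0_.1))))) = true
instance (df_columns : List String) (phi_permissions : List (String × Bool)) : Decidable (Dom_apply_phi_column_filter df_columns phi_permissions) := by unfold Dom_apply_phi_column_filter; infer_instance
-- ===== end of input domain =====

-- B replaces A's blocked-set branch ladder + single filter with a table-driven staged deletion: one removal pass per non-viewable PHI column (objective: alternative).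


-- ===== PORT A =====
def apply_phi_column_filter (df_columns : List String) (phi_permissions : List (String × Bool)) : List String :=
  let d := PySem.Dict.mk phi_permissions
  let blocked : PySem.Set String := PySem.Set.empty
  let blocked :=
    if ¬ (d.getD "can_view_phi" false = true) then
      PySem.Set.update blocked ["patient_name", "visit_id", "mrn", "dob"]
    else
      let blocked := if ¬ (d.getD "can_view_patient_name" false = true) then PySem.Set.add blocked "patient_name" else blocked
      let blocked := if ¬ (d.getD "can_view_visit_id" false = true) then PySem.Set.add blocked "visit_id" else blocked
      let blocked := if ¬ (d.getD "can_view_mrn" false = true) then PySem.Set.add blocked "mrn" else blocked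
      let blocked := if ¬ (d.getD "can_view_dob" false = true) then PySem.Set.add blocked "dob" else blocked
      blocked
  df_columns.filter (fun col => !PySem.Set.contains blocked col)

-- ===== PORT B =====
def PHI_TABLE_alt : List (String × String) :=
  [("patient_name", "can_view_patient_name"),
   ("visit_id", "can_view_visit_id"),
   ("mrn", "can_view_mrn"),
   ("dob", "can_view_dob")]

def apply_phi_column_filter_alt (df_columns : List String) (phi_permissions : List (String × Bool)) : List String :=
  let d := PySem.Dict.mk phi_permissions
  let master := d.getD "can_view_phi" false
  PHI_TABLE_alt.foldl
    (fun out ck =>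
      if ¬ (master && d.getD ck.2 false) = true then
        out.filter (fun c => c ≠ ck.1)
      else out)
    df_columns

-- ===== PRECONDITION & SPEC =====
def Spec_apply_phi_column_filter (df_columns : List String) (phi_permissions : List (String × Bool)) (out : List String) : Prop := out = apply_phi_column_filter_alt df_columns phi_permissions
instance (df_columns : List String) (phi_permissions : List (String × Bool)) (out : List String) : Decidable (Spec_apply_phi_column_filter df_columns phi_permissions out) := by unfold Spec_apply_phi_column_filter; infer_instance

-- ===== CLAIM (what is proved, stated in full; the proofs are below) =====
def Claim_equal_apply_phi_column_filter : Prop := ∀ (df_columns : List String) (phi_permissions : List (String × Bool)), Dom_apply_phi_column_filter df_columns phi_permissions → Spec_apply_phi_column_filter df_columns phi_permissions (apply_phi_column_filter df_columns phi_permissions)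

-- ===== LEMMAS AND PROOFS =====

-- the staged deletion foldl is one filter against a conjunction over the table
theorem foldl_staged (tbl : List (String × String)) (P : String → Bool) (df : List String) :
    tbl.foldl
      (fun out ck => if ¬ (P ck.2) = true then out.filter (fun c => c ≠ ck.1) else out)
      df
    = df.filter (fun col => tbl.all (fun ck => P ck.2 || decide (col ≠ ck.1))) := by
  induction tbl generalizing df with
  | nil => simp
  | cons hd tl ih =>
    simp only [List.foldl_cons, List.all_cons]
    by_cases h : P hd.2 = true
    · rw [if_neg (by simp [h]), ih]
      apply List.filter_congr
      intro col _
      simp [h]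
    · replace h : P hd.2 = false := by simpa using h
      rw [if_pos (by simp [h]), ih, List.filter_filter]
      apply List.filter_congr
      intro col _
      simp only [h, Bool.false_or]
      exact Bool.and_comm _ _

-- pointwise: membership in A's blocked set is the negation of B's table predicate
set_option maxHeartbeats 1000000 in
theorem phi_blocked_iff (col : String) (d : PySem.Dict String Bool) :
    (PySem.Set.contains
      (if ¬ (d.getD "can_view_phi" false = true) then
         PySem.Set.update PySem.Set.empty ["patient_name", "visit_id", "mrn", "dob"]
       else
         let b := (PySem.Set.empty : PySem.Set String)
         let b := if ¬ (d.getD "can_view_patient_name" false = true) then PySem.Set.add b "patient_name" else b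
         let b := if ¬ (d.getD "can_view_visit_id" false = true) then PySem.Set.add b "visit_id" else b
         let b := if ¬ (d.getD "can_view_mrn" false = true) then PySem.Set.add b "mrn" else b
         let b := if ¬ (d.getD "can_view_dob" false = true) then PySem.Set.add b "dob" else b
         b) col)
    =
    !(PHI_TABLE_alt.all (fun ck =>
        (d.getD "can_view_phi" false && d.getD ck.2 false) || decide (col ≠ ck.1))) := by
  by_cases h1 : col = "patient_name" <;>
  by_cases h2 : col = "visit_id" <;>
  by_cases h3 : col = "mrn" <;>
  by_cases h4 : col = "dob" <;>
    first
    | (exfalso; simp_all; done)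
    | (cases hphi : d.getD "can_view_phi" false <;>
       cases hA : d.getD "can_view_patient_name" false <;>
       cases hB : d.getD "can_view_visit_id" false <;>
       cases hC : d.getD "can_view_mrn" false <;>
       cases hD : d.getD "can_view_dob" false <;>
         simp_all [PHI_TABLE_alt, PySem.Set.update, PySem.Set.add, PySem.Set.contains,
           PySem.Set.empty])

-- ===== VERDICT (by name: the statement is the Claim_ definition above) =====
theorem apply_phi_column_filter_spec : Claim_equal_apply_phi_column_filter := by
  intro df_columns phi_permissions _
  unfold Spec_apply_phi_column_filter apply_phi_column_filter apply_phi_column_filter_alt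
  rw [foldl_staged PHI_TABLE_alt
    (fun s => PySem.Dict.getD (PySem.Dict.mk phi_permissions) "can_view_phi" false &&
              PySem.Dict.getD (PySem.Dict.mk phi_permissions) s false) df_columns]
  apply List.filter_congr
  intro col _
  rw [phi_blocked_iff col (PySem.Dict.mk phi_permissions)]
  simp
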